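-- pv_equiv track=rewrite | github.com/YahelReiss/passing-generator | tools.py | calculate_pattern_orbit
-- ===== SOURCE A (Python) =====
-- def is_valid(
--     pattern: list[int] | tuple[int, ...], num_of_object: int | None = None
-- ) -> bool:
--     """
--     Check if a pattern is valid based on collision and object count.
--
--     Args:
--         pattern (list[int] | tuple[int,...]): The pattern to validate.
--
--     Returns:
--         bool: `True` if the pattern is valid, `False` otherwise.
--     """
--     period = len(pattern)
--
--     # Check if the number of objects (balls) is an integer
--     if sum(pattern) / period != int(sum(pattern) / period):
--         return False
--
--     if num_of_object and sum(pattern) / period != num_of_object: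
--         return False
--
--     landing = [False] * period  # Tracks where throws land
--
--     for index, throw in enumerate(pattern):
--         position = (throw + index) % period
--         if landing[position]:  # Collision detected
--             return False
--         landing[position] = True
--     return True
--
-- def calculate_pattern_orbit(pattern: list[int]) -> list[tuple[int]]:
--     assert is_valid(pattern)
--     indices = set()
--     res = []
--     for i, throw in enumerate(pattern):
--         if i in indices:
--             continue
--         next_index = (i + throw) % len(pattern)
--         curr_orbit_indices = [i]
--         while next_index != i:
--             indices.add(next_index)
--             curr_orbit_indices.append(next_index)
--             next_index = (next_index + pattern[next_index]) % len(pattern)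
--         res.append(
--             tuple(
--                 pattern[j] if j in curr_orbit_indices else 0
--                 for j in range(len(pattern))
--             )
--         )
--     return res
-- ===== SOURCE B (Python) =====
-- def is_valid(
--     pattern: list[int] | tuple[int, ...], num_of_object: int | None = None
-- ) -> bool:
--     period = len(pattern)
--
--     if sum(pattern) / period != int(sum(pattern) / period):
--         return False
--
--     if num_of_object and sum(pattern) / period != num_of_object:
--         return False
--
--     landing = [False] * period
--
--     for index, throw in enumerate(pattern):
--         position = (throw + index) % period
--         if landing[position]:
--             return False
--         landing[position] = True
--     return True
--
--
-- def calculate_pattern_orbit(pattern: list[int]) -> list[tuple[int]]: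
--     assert is_valid(pattern)
--     n = len(pattern)
--     cycle_id = [-1] * n
--     orbits = []
--     for i in range(n):
--         if cycle_id[i] != -1:
--             continue
--         o = [0] * n
--         j = i
--         while cycle_id[j] == -1:
--             cycle_id[j] = len(orbits)
--             o[j] = pattern[j]
--             j = (j + pattern[j]) % n
--         orbits.append(tuple(o))
--     return orbits
-- ===== Notes on version B (the rewrite author's own statement) =====
-- stated objective: faster
-- what changed: B replaces A's per-orbit full-range membership scan (building each tuple by testing every index against the orbit's index list) with a single cycle walk that fills a preallocated zero array in place and marks visited indices in an int array, removing the nested pass.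
import Mathlib
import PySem

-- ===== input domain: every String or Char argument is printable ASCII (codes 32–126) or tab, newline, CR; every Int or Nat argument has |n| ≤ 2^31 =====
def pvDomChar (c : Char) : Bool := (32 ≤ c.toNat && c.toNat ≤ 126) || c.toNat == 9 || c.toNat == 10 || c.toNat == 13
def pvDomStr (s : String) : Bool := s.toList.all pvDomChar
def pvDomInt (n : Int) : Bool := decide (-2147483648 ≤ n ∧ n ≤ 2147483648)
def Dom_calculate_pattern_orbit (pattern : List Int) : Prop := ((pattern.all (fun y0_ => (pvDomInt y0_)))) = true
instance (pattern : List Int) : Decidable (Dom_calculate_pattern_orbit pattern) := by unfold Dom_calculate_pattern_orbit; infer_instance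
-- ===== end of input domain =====

-- B groups the throws into permutation orbits with a single in-place cycle walk (marking
-- visited indices in an int array and filling each orbit tuple during the walk), instead of
-- A's per-orbit membership scan over the whole range; objective: faster.

-- ===== PORT A =====

-- helper is_valid, shared by both Pythons. The float check 'sum/period != int(sum/period)'
-- is ported as exact divisibility (exact on this task's int domain); period = 0 makes the
-- Python raise ZeroDivisionError there (outside Pre_), the port returns false.
def pvLandingLoop (period : Int) : List (Int × Int) → List Bool → Bool
  | [], _ => true
  | (index, throw) :: rest, landing =>
    let position := PySem.Int.mod (throw + index) period
    if landing.getD position.toNat false then false  -- position ∈ [0, period), so getD/set are exact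
    else pvLandingLoop period rest (landing.set position.toNat true)

def pv_is_valid (pattern : List Int) (num_of_object : Option Int) : Bool :=
  let period : Int := (pattern.length : Int)
  if period == 0 then false   -- Python: ZeroDivisionError; outside Pre_
  else if !(PySem.Int.mod pattern.sum period == 0) then false
  else if (match num_of_object with
           | some k => !(k == 0) && !(PySem.Int.floordiv pattern.sum period == k)
           | none => false) then false
  else pvLandingLoop period (PySem.List.enumerate pattern 0) (List.replicate pattern.length false)

-- A's inner while loop; fuel = len(pattern) bounds the cycle length (under Pre_ the walk
-- returns to i within len(pattern) steps, so the fuel is never exhausted there).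
def pvAWalk (pattern : List Int) (n i : Int) : Nat → Int → PySem.Set Int → List Int → PySem.Set Int × List Int
  | 0, _, indices, curr => (indices, curr)
  | fuel+1, next, indices, curr =>
    if next == i then (indices, curr)
    else pvAWalk pattern n i fuel (PySem.Int.mod (next + PySem.List.pyGetD pattern next 0) n)
          (PySem.Set.add indices next) (curr ++ [next])

def pvALoop (pattern : List Int) (n : Int) : List (Int × Int) → PySem.Set Int → List (List Int) → List (List Int)
  | [], _, res => res
  | (i, throw) :: rest, indices, res =>
    if PySem.Set.contains indices i then pvALoop pattern n rest indices res
    else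
      pvALoop pattern n rest
        (pvAWalk pattern n i pattern.length (PySem.Int.mod (i + throw) n) indices [i]).1
        (res ++ [(PySem.List.pyRange 0 n 1).map
                   (fun j => if (pvAWalk pattern n i pattern.length (PySem.Int.mod (i + throw) n) indices [i]).2.contains j
                             then PySem.List.pyGetD pattern j 0 else 0)])

def calculate_pattern_orbit (pattern : List Int) : List (List Int) :=
  if pv_is_valid pattern none then
    pvALoop pattern (pattern.length : Int) (PySem.List.enumerate pattern 0) PySem.Set.empty []
  else []   -- assert is_valid(pattern) fails: Python raises; outside Pre_

-- ===== PORT B =====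

-- B's inner while loop: marks cycle_id[j] and writes o[j] while walking the cycle.
def pvBWalk (pattern : List Int) (n oid : Int) : Nat → Int → List Int → List Int → List Int × List Int
  | 0, _, cid, o => (cid, o)
  | fuel+1, j, cid, o =>
    if PySem.List.pyGetD cid j 0 == -1 then   -- j ∈ [0, n), so pyGetD/set are exact
      pvBWalk pattern n oid fuel (PySem.Int.mod (j + PySem.List.pyGetD pattern j 0) n)
        (cid.set j.toNat oid) (o.set j.toNat (PySem.List.pyGetD pattern j 0))
    else (cid, o)

def pvBLoop (pattern : List Int) (n : Int) : List Int → List Int → List (List Int) → List (List Int)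
  | [], _, orbits => orbits
  | i :: rest, cid, orbits =>
    if !(PySem.List.pyGetD cid i 0 == -1) then pvBLoop pattern n rest cid orbits
    else
      pvBLoop pattern n rest
        (pvBWalk pattern n (orbits.length : Int) pattern.length i cid (List.replicate pattern.length 0)).1
        (orbits ++ [(pvBWalk pattern n (orbits.length : Int) pattern.length i cid (List.replicate pattern.length 0)).2])

def calculate_pattern_orbit_alt (pattern : List Int) : List (List Int) :=
  if pv_is_valid pattern none then
    pvBLoop pattern (pattern.length : Int) (PySem.List.pyRange 0 (pattern.length : Int) 1)
      (List.replicate pattern.length (-1)) []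
  else []

-- ===== PRECONDITION & SPEC =====
-- Pre_ is exactly where A returns: nonempty pattern (else ZeroDivisionError in is_valid),
-- integer average, and no two throws landing on the same position (else AssertionError).
def Pre_calculate_pattern_orbit (pattern : List Int) : Prop :=
  pattern ≠ [] ∧
  PySem.Int.mod pattern.sum (pattern.length : Int) = 0 ∧
  ((PySem.List.enumerate pattern 0).map
     (fun it => PySem.Int.mod (it.2 + it.1) (pattern.length : Int))).Nodup

instance (pattern : List Int) : Decidable (Pre_calculate_pattern_orbit pattern) := by
  unfold Pre_calculate_pattern_orbit; infer_instance

def pvWitness_calculate_pattern_orbit : List Int := [3, 1, 2]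

def Spec_calculate_pattern_orbit (pattern : List Int) (out : List (List Int)) : Prop := out = calculate_pattern_orbit_alt pattern
instance (pattern : List Int) (out : List (List Int)) : Decidable (Spec_calculate_pattern_orbit pattern out) := by unfold Spec_calculate_pattern_orbit; infer_instance

-- ===== CLAIM (what is proved, stated in full; the proofs are below) =====
def Claim_equal_calculate_pattern_orbit : Prop := ∀ (pattern : List Int), Dom_calculate_pattern_orbit pattern → Pre_calculate_pattern_orbit pattern → Spec_calculate_pattern_orbit pattern (calculate_pattern_orbit pattern)

-- ===== LEMMAS AND PROOFS =====

-- the successor map i ↦ (i + pattern[i]) % n that both programs walk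
def pvF (p : List Int) (x : Int) : Int :=
  PySem.Int.mod (x + PySem.List.pyGetD p x 0) ((p.length : Int))

-- injectivity of the successor map on [0, n) (what Pre_'s no-collision clause yields)
def pvInj (p : List Int) : Prop :=
  ∀ a b : Int, 0 ≤ a → a < (p.length : Int) → 0 ≤ b → b < (p.length : Int) → pvF p a = pvF p b → a = b

def pvMarked (cid : List Int) (j : Int) : Prop := PySem.List.pyGetD cid j 0 ≠ -1

-- first t nodes of the cycle of i
def pvTraj (p : List Int) (i : Int) (t : Nat) : List Int := (List.range t).map (fun k => (pvF p)^[k] i)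

-- coupling invariant between A's visited set S and B's cycle_id array before outer index t
def pvInv (p : List Int) (t : Nat) (S : PySem.Set Int) (cid : List Int) : Prop :=
  cid.length = p.length ∧
  (∀ j : Int, 0 ≤ j → j < (p.length : Int) → pvMarked cid j → pvMarked cid (pvF p j)) ∧
  (∀ j : Int, 0 ≤ j → j < (p.length : Int) → pvMarked cid (pvF p j) → pvMarked cid j) ∧
  (∀ j : Int, (t : Int) ≤ j → j < (p.length : Int) → (j ∈ S ↔ pvMarked cid j))

theorem pvLen_pos (p : List Int) (hp : p ≠ []) : (0:Int) < (p.length : Int) := by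
  have := List.length_pos_iff.mpr hp; exact_mod_cast this

theorem pvF_nonneg (p : List Int) (hp : p ≠ []) (x : Int) : 0 ≤ pvF p x :=
  PySem.Int.mod_nonneg _ (pvLen_pos p hp)

theorem pvF_lt (p : List Int) (hp : p ≠ []) (x : Int) : pvF p x < (p.length : Int) :=
  PySem.Int.mod_lt _ (pvLen_pos p hp)

theorem pvIter_range (p : List Int) (hp : p ≠ []) (i : Int) (h0 : 0 ≤ i) (h1 : i < (p.length : Int)) :
    ∀ k : Nat, 0 ≤ (pvF p)^[k] i ∧ (pvF p)^[k] i < (p.length : Int) := by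
  intro k
  induction k with
  | zero => exact ⟨h0, h1⟩
  | succ k ih =>
    rw [Function.iterate_succ_apply']
    exact ⟨pvF_nonneg p hp _, pvF_lt p hp _⟩

theorem pvIter_cancel (p : List Int) (hp : p ≠ []) (hinj : pvInj p)
    (a : Nat) (x y : Int) (hx0 : 0 ≤ x) (hx1 : x < (p.length : Int)) (hy0 : 0 ≤ y) (hy1 : y < (p.length : Int))
    (h : (pvF p)^[a] x = (pvF p)^[a] y) : x = y := by
  induction a generalizing x y with
  | zero => simpa using h
  | succ a ih =>
    rw [Function.iterate_succ_apply, Function.iterate_succ_apply] at h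
    have := ih (pvF p x) (pvF p y) (pvF_nonneg p hp x) (pvF_lt p hp x) (pvF_nonneg p hp y) (pvF_lt p hp y) h
    exact hinj x y hx0 hx1 hy0 hy1 this

theorem pvPeriodic (p : List Int) (hp : p ≠ []) (hinj : pvInj p)
    (i : Int) (h0 : 0 ≤ i) (h1 : i < (p.length : Int)) :
    i ∈ Function.periodicPts (pvF p) := by
  obtain ⟨a, ha, b, hb, hne, heq⟩ :=
    Finset.exists_ne_map_eq_of_card_lt_of_maps_to
      (s := Finset.range (p.length + 1)) (t := Finset.Ico (0:Int) (p.length : Int))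
      (by simp)
      (f := fun k => (pvF p)^[k] i)
      (by intro k _
          simp only [Finset.coe_Ico, Set.mem_Ico]
          exact ⟨(pvIter_range p hp i h0 h1 k).1, (pvIter_range p hp i h0 h1 k).2⟩)
  rcases Nat.lt_or_ge a b with hab | hab
  · have hsplit : (pvF p)^[a] ((pvF p)^[b - a] i) = (pvF p)^[a] i := by
      rw [← Function.iterate_add_apply]
      have hba : a + (b - a) = b := by omega
      rw [hba, heq]
    have hfix : (pvF p)^[b - a] i = i :=
      pvIter_cancel p hp hinj a _ _ (pvIter_range p hp i h0 h1 _).1 (pvIter_range p hp i h0 h1 _).2 h0 h1 hsplit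
    exact ⟨b - a, by omega, hfix⟩
  · have hba : b < a := by omega
    have hsplit : (pvF p)^[b] ((pvF p)^[a - b] i) = (pvF p)^[b] i := by
      rw [← Function.iterate_add_apply]
      have hab' : b + (a - b) = a := by omega
      rw [hab', heq]
    have hfix : (pvF p)^[a - b] i = i :=
      pvIter_cancel p hp hinj b _ _ (pvIter_range p hp i h0 h1 _).1 (pvIter_range p hp i h0 h1 _).2 h0 h1 hsplit
    exact ⟨a - b, by omega, hfix⟩

theorem pvTrajDistinct (p : List Int) (hp : p ≠ []) (hinj : pvInj p)
    (i : Int) (h0 : 0 ≤ i) (h1 : i < (p.length : Int))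
    (a b : Nat) (hab : a < b) (hb : b < Function.minimalPeriod (pvF p) i) :
    (pvF p)^[a] i ≠ (pvF p)^[b] i := by
  intro h
  have hsplit : (pvF p)^[a] i = (pvF p)^[a] ((pvF p)^[b - a] i) := by
    rw [← Function.iterate_add_apply]
    have hba : a + (b - a) = b := by omega
    rw [hba, h]
  have hfix : i = (pvF p)^[b - a] i :=
    pvIter_cancel p hp hinj a _ _ h0 h1 (pvIter_range p hp i h0 h1 _).1 (pvIter_range p hp i h0 h1 _).2 hsplit
  have hper : Function.IsPeriodicPt (pvF p) (b - a) i := hfix.symm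
  have := hper.minimalPeriod_le (by omega)
  omega

theorem pvPeriodLe (p : List Int) (hp : p ≠ []) (hinj : pvInj p)
    (i : Int) (h0 : 0 ≤ i) (h1 : i < (p.length : Int)) :
    Function.minimalPeriod (pvF p) i ≤ p.length := by
  have hcard := Finset.card_le_card_of_injOn (f := fun k => (pvF p)^[k] i)
    (s := Finset.range (Function.minimalPeriod (pvF p) i)) (t := Finset.Ico (0:Int) (p.length : Int))
    (by intro k _
        simp only [Finset.coe_Ico, Set.mem_Ico]
        exact ⟨(pvIter_range p hp i h0 h1 k).1, (pvIter_range p hp i h0 h1 k).2⟩)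
    (by intro a ha b hb hfe
        simp only [Finset.coe_range, Set.mem_Iio] at ha hb
        by_contra hne
        rcases Nat.lt_or_ge a b with h' | h'
        · exact pvTrajDistinct p hp hinj i h0 h1 a b h' hb hfe
        · exact pvTrajDistinct p hp hinj i h0 h1 b a (by omega) ha hfe.symm)
  simpa using hcard

theorem pvTraj_mem (p : List Int) (i x : Int) (t : Nat) :
    x ∈ pvTraj p i t ↔ ∃ k : Nat, k < t ∧ (pvF p)^[k] i = x := by
  simp only [pvTraj, List.mem_map, List.mem_range]

theorem pvTraj_succ (p : List Int) (i : Int) (t : Nat) :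
    pvTraj p i (t + 1) = pvTraj p i t ++ [(pvF p)^[t] i] := by
  simp [pvTraj, List.range_succ]

theorem pvTraj_one (p : List Int) (i : Int) : pvTraj p i 1 = [i] := by
  simp [pvTraj]

theorem pvTraj_nonneg (p : List Int) (hp : p ≠ []) (i : Int) (h0 : 0 ≤ i) (h1 : i < (p.length : Int))
    (t : Nat) : ∀ j ∈ pvTraj p i t, 0 ≤ j := by
  intro j hj
  rw [pvTraj_mem] at hj
  obtain ⟨k, _, hk⟩ := hj
  rw [← hk]; exact (pvIter_range p hp i h0 h1 k).1

-- ---- A's while loop ----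
theorem pvAWalk_spec (p : List Int) (i : Int) :
    ∀ (fuel t : Nat) (S : PySem.Set Int),
      1 ≤ t → t ≤ Function.minimalPeriod (pvF p) i →
      Function.minimalPeriod (pvF p) i - t ≤ fuel →
      pvAWalk p (p.length : Int) i fuel ((pvF p)^[t] i) S (pvTraj p i t)
        = (((List.range' t (Function.minimalPeriod (pvF p) i - t)).map
              (fun k => (pvF p)^[k] i)).foldl PySem.Set.add S,
           pvTraj p i (Function.minimalPeriod (pvF p) i)) := by
  intro fuel
  induction fuel with
  | zero =>
    intro t S ht1 ht2 hfuel
    have ht : t = Function.minimalPeriod (pvF p) i := by omega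
    subst ht
    simp [pvAWalk]
  | succ fuel ih =>
    intro t S ht1 ht2 hfuel
    rcases eq_or_lt_of_le ht2 with hteq | htlt
    · rw [← hteq]
      have hfix : (pvF p)^[t] i = i := by rw [hteq]; exact Function.iterate_minimalPeriod
      simp [pvAWalk, hfix]
    · have hne : (pvF p)^[t] i ≠ i := by
        intro h
        have hper : Function.IsPeriodicPt (pvF p) t i := h
        have := hper.minimalPeriod_le (by omega)
        omega
      have hstep : PySem.Int.mod ((pvF p)^[t] i + PySem.List.pyGetD p ((pvF p)^[t] i) 0) (p.length : Int)
          = (pvF p)^[t+1] i := by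
        rw [Function.iterate_succ_apply']
        rfl
      rw [pvAWalk]
      simp only [beq_iff_eq, hne, if_false]
      rw [hstep, ← pvTraj_succ]
      rw [ih (t+1) (PySem.Set.add S ((pvF p)^[t] i)) (by omega) (by omega) (by omega)]
      have hrange : List.range' t (Function.minimalPeriod (pvF p) i - t)
          = t :: List.range' (t+1) (Function.minimalPeriod (pvF p) i - (t+1)) := by
        have hc : Function.minimalPeriod (pvF p) i - t = (Function.minimalPeriod (pvF p) i - (t+1)) + 1 := by omega
        rw [hc, List.range'_succ]
      rw [hrange]
      simp

-- ---- getD after a fold of in-range writes ----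
theorem pvFoldSet_len (g : Int → Int) (l : List Int) (init : List Int) :
    (l.foldl (fun acc j => acc.set j.toNat (g j)) init).length = init.length := by
  induction l generalizing init with
  | nil => rfl
  | cons j rest ih => simp [List.foldl_cons, ih]

theorem pvFoldSet_getD (g : Int → Int) (l : List Int) (init : List Int) (x : Int)
    (hx0 : 0 ≤ x) (hx1 : x < (init.length : Int)) (hl : ∀ j ∈ l, 0 ≤ j) :
    PySem.List.pyGetD (l.foldl (fun acc j => acc.set j.toNat (g j)) init) x 0
      = if x ∈ l then g x else PySem.List.pyGetD init x 0 := by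
  induction l generalizing init with
  | nil => simp
  | cons j rest ih =>
    have hj0 : 0 ≤ j := hl j (by simp)
    have hlen : ((init.set j.toNat (g j)).length : Int) = (init.length : Int) := by simp
    rw [List.foldl_cons, ih (init.set j.toNat (g j)) (by rw [hlen]; exact hx1) (fun a ha => hl a (by simp [ha]))]
    by_cases hxr : x ∈ rest
    · simp [hxr]
    · by_cases hxj : x = j
      · subst hxj
        rw [PySem.List.pyGetD_eq_getElem _ _ hx0 (by rw [hlen]; exact hx1)]
        simp [hxr]
      · have hne : j.toNat ≠ x.toNat := by omega
        rw [PySem.List.pyGetD_eq_getElem _ _ hx0 (by rw [hlen]; exact hx1),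
            PySem.List.pyGetD_eq_getElem _ _ hx0 hx1]
        simp [hxr, hxj, hne]

-- ---- B's while loop ----
theorem pvBWalk_spec (p : List Int) (hp : p ≠ []) (hinj : pvInj p)
    (i : Int) (h0 : 0 ≤ i) (h1 : i < (p.length : Int)) (oid : Int) (hoid : 0 ≤ oid)
    (cid₀ : List Int) (hcl : cid₀.length = p.length)
    (o₀ : List Int)
    (hunm : ∀ k : Nat, k < Function.minimalPeriod (pvF p) i → PySem.List.pyGetD cid₀ ((pvF p)^[k] i) 0 = -1) :
    ∀ (fuel t : Nat),
      t ≤ Function.minimalPeriod (pvF p) i →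
      Function.minimalPeriod (pvF p) i - t ≤ fuel →
      pvBWalk p (p.length : Int) oid fuel ((pvF p)^[t] i)
        ((pvTraj p i t).foldl (fun acc j => acc.set j.toNat oid) cid₀)
        ((pvTraj p i t).foldl (fun acc j => acc.set j.toNat (PySem.List.pyGetD p j 0)) o₀)
      = ((pvTraj p i (Function.minimalPeriod (pvF p) i)).foldl (fun acc j => acc.set j.toNat oid) cid₀,
         (pvTraj p i (Function.minimalPeriod (pvF p) i)).foldl
           (fun acc j => acc.set j.toNat (PySem.List.pyGetD p j 0)) o₀) := by
  have hc0 : 0 < Function.minimalPeriod (pvF p) i :=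
    Function.minimalPeriod_pos_iff_mem_periodicPts.mpr (pvPeriodic p hp hinj i h0 h1)
  intro fuel
  induction fuel with
  | zero =>
    intro t ht2 hfuel
    have ht : t = Function.minimalPeriod (pvF p) i := by omega
    subst ht
    simp [pvBWalk]
  | succ fuel ih =>
    intro t ht2 hfuel
    rcases eq_or_lt_of_le ht2 with hteq | htlt
    · rw [← hteq]
      have hfix : (pvF p)^[t] i = i := by rw [hteq]; exact Function.iterate_minimalPeriod
      have hmem : i ∈ pvTraj p i t := by rw [pvTraj_mem]; exact ⟨0, by omega, rfl⟩
      rw [pvBWalk, hfix]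
      rw [pvFoldSet_getD _ _ _ _ h0 (by rw [hcl]; exact h1) (pvTraj_nonneg p hp i h0 h1 t)]
      rw [if_pos hmem]
      have hoidne : (oid == -1) = false := beq_eq_false_iff_ne.mpr (by omega)
      rw [hoidne]
      simp
    · have hj0 : 0 ≤ (pvF p)^[t] i := (pvIter_range p hp i h0 h1 t).1
      have hj1 : (pvF p)^[t] i < (p.length : Int) := (pvIter_range p hp i h0 h1 t).2
      have hnotmem : (pvF p)^[t] i ∉ pvTraj p i t := by
        rw [pvTraj_mem]
        rintro ⟨k, hk, hke⟩
        exact pvTrajDistinct p hp hinj i h0 h1 k t hk htlt hke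
      rw [pvBWalk]
      rw [pvFoldSet_getD _ _ _ _ hj0 (by rw [hcl]; exact hj1) (pvTraj_nonneg p hp i h0 h1 t)]
      rw [if_neg hnotmem, hunm t htlt]
      simp only [BEq.rfl, if_true]
      have hstep : PySem.Int.mod ((pvF p)^[t] i + PySem.List.pyGetD p ((pvF p)^[t] i) 0) (p.length : Int)
          = (pvF p)^[t+1] i := by
        rw [Function.iterate_succ_apply']; rfl
      rw [hstep]
      have hcidstep : ((pvTraj p i t).foldl (fun acc j => acc.set j.toNat oid) cid₀).set ((pvF p)^[t] i).toNat oid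
          = (pvTraj p i (t+1)).foldl (fun acc j => acc.set j.toNat oid) cid₀ := by
        rw [pvTraj_succ, List.foldl_append]; rfl
      have hostep : ((pvTraj p i t).foldl (fun acc j => acc.set j.toNat (PySem.List.pyGetD p j 0)) o₀).set
            ((pvF p)^[t] i).toNat (PySem.List.pyGetD p ((pvF p)^[t] i) 0)
          = (pvTraj p i (t+1)).foldl (fun acc j => acc.set j.toNat (PySem.List.pyGetD p j 0)) o₀ := by
        rw [pvTraj_succ, List.foldl_append]; rfl
      rw [hcidstep, hostep]
      exact ih (t+1) (by omega) (by omega)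

-- ---- A's orbit tuple equals B's orbit array ----
theorem pvTuple_eq (p : List Int) (hp : p ≠ [])
    (i : Int) (h0 : 0 ≤ i) (h1 : i < (p.length : Int)) (t : Nat) :
    (PySem.List.pyRange 0 (p.length : Int) 1).map
        (fun j => if (pvTraj p i t).contains j then PySem.List.pyGetD p j 0 else 0)
      = (pvTraj p i t).foldl (fun acc j => acc.set j.toNat (PySem.List.pyGetD p j 0))
          (List.replicate p.length 0) := by
  apply List.ext_getElem
  · rw [List.length_map, PySem.List.length_pyRange_one, pvFoldSet_len]
    simp
  · intro k hk1 hk2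
    rw [List.length_map, PySem.List.length_pyRange_one] at hk1
    have hkn : k < p.length := by omega
    rw [List.getElem_map, PySem.List.getElem_pyRange_one]
    have hfold := pvFoldSet_getD (fun j => PySem.List.pyGetD p j 0) (pvTraj p i t)
      (List.replicate p.length 0) ((k : Nat) : Int) (by positivity) (by simpa using hkn)
      (pvTraj_nonneg p hp i h0 h1 t)
    rw [PySem.List.pyGetD_eq_getElem _ _ (by positivity)
      (by rw [pvFoldSet_len]; simpa using hkn)] at hfold
    simp only [Int.toNat_natCast] at hfold
    rw [hfold]
    simp only [zero_add, List.contains_iff_mem]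
    split
    · rfl
    · rw [PySem.List.pyGetD_natCast, List.getD_replicate _ hkn]

-- closure of a finished cycle under pvF, both ways
theorem pvCycle_closed_fwd (p : List Int) (hp : p ≠ []) (hinj : pvInj p)
    (i : Int) (h0 : 0 ≤ i) (h1 : i < (p.length : Int))
    (x : Int) (hx : x ∈ pvTraj p i (Function.minimalPeriod (pvF p) i)) :
    pvF p x ∈ pvTraj p i (Function.minimalPeriod (pvF p) i) := by
  have hc0 : 0 < Function.minimalPeriod (pvF p) i :=
    Function.minimalPeriod_pos_iff_mem_periodicPts.mpr (pvPeriodic p hp hinj i h0 h1)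
  rw [pvTraj_mem] at hx ⊢
  obtain ⟨k, hk, hke⟩ := hx
  by_cases hkc : k + 1 = Function.minimalPeriod (pvF p) i
  · refine ⟨0, by omega, ?_⟩
    rw [← hke, ← Function.iterate_succ_apply' (pvF p) k i]
    show (pvF p)^[0] i = (pvF p)^[k + 1] i
    rw [hkc]
    simp [Function.iterate_minimalPeriod]
  · exact ⟨k + 1, by omega, by rw [← hke, ← Function.iterate_succ_apply' (pvF p) k i]⟩

theorem pvCycle_closed_bwd (p : List Int) (hp : p ≠ []) (hinj : pvInj p)
    (i : Int) (h0 : 0 ≤ i) (h1 : i < (p.length : Int))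
    (x : Int) (hx0 : 0 ≤ x) (hx1 : x < (p.length : Int))
    (hx : pvF p x ∈ pvTraj p i (Function.minimalPeriod (pvF p) i)) :
    x ∈ pvTraj p i (Function.minimalPeriod (pvF p) i) := by
  have hc0 : 0 < Function.minimalPeriod (pvF p) i :=
    Function.minimalPeriod_pos_iff_mem_periodicPts.mpr (pvPeriodic p hp hinj i h0 h1)
  rw [pvTraj_mem] at hx ⊢
  obtain ⟨k, hk, hke⟩ := hx
  rcases Nat.eq_zero_or_pos k with hk0 | hkpos
  · subst hk0
    have hmp : (pvF p)^[Function.minimalPeriod (pvF p) i] i = i := Function.iterate_minimalPeriod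
    have heq : pvF p ((pvF p)^[Function.minimalPeriod (pvF p) i - 1] i) = pvF p x := by
      rw [← Function.iterate_succ_apply' (pvF p) (Function.minimalPeriod (pvF p) i - 1) i]
      show (pvF p)^[Function.minimalPeriod (pvF p) i - 1 + 1] i = pvF p x
      have h2 : Function.minimalPeriod (pvF p) i - 1 + 1 = Function.minimalPeriod (pvF p) i := by omega
      rw [h2, hmp]
      exact hke
    refine ⟨Function.minimalPeriod (pvF p) i - 1, by omega, ?_⟩
    exact hinj _ _ (pvIter_range p hp i h0 h1 _).1 (pvIter_range p hp i h0 h1 _).2 hx0 hx1 heq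
  · have heq : pvF p ((pvF p)^[k - 1] i) = pvF p x := by
      rw [← Function.iterate_succ_apply' (pvF p) (k - 1) i]
      show (pvF p)^[k - 1 + 1] i = pvF p x
      have h2 : k - 1 + 1 = k := by omega
      rw [h2]
      exact hke
    refine ⟨k - 1, by omega, ?_⟩
    exact hinj _ _ (pvIter_range p hp i h0 h1 _).1 (pvIter_range p hp i h0 h1 _).2 hx0 hx1 heq

-- an unmarked point has its whole cycle unmarked (marked set is backward closed)
theorem pvUnmarked_cycle (p : List Int) (hp : p ≠ [])
    (cid : List Int)
    (ha2 : ∀ j : Int, 0 ≤ j → j < (p.length : Int) → pvMarked cid (pvF p j) → pvMarked cid j)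
    (i : Int) (h0 : 0 ≤ i) (h1 : i < (p.length : Int)) (hi : ¬ pvMarked cid i) :
    ∀ k : Nat, ¬ pvMarked cid ((pvF p)^[k] i) := by
  intro k
  induction k with
  | zero => simpa using hi
  | succ k ih =>
    rw [Function.iterate_succ_apply']
    intro h
    exact ih (ha2 _ (pvIter_range p hp i h0 h1 k).1 (pvIter_range p hp i h0 h1 k).2 h)

-- ---- the outer loops, coupled ----
theorem pvLoop_eq (p : List Int) (hp : p ≠ []) (hinj : pvInj p) :
    ∀ (m t : Nat) (S : PySem.Set Int) (cid : List Int) (res : List (List Int)),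
      m = p.length - t → pvInv p t S cid →
      pvALoop p (p.length : Int) (PySem.List.enumerate (p.drop t) t) S res
        = pvBLoop p (p.length : Int) (PySem.List.pyRange (t : Int) (p.length : Int) 1) cid res := by
  intro m
  induction m with
  | zero =>
    intro t S cid res hm _
    have ht : p.length ≤ t := by omega
    rw [List.drop_eq_nil_of_le ht]
    rw [PySem.List.pyRange_one_eq_nil (by exact_mod_cast ht)]
    rfl
  | succ m ih =>
    intro t S cid res hm hinv
    obtain ⟨hcl, ha1, ha2, hb⟩ := hinv
    have htlen : t < p.length := by omega
    have htlen' : (t : Int) < (p.length : Int) := by exact_mod_cast htlen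
    have h0t : (0:Int) ≤ (t : Int) := by positivity
    have hdrop : p.drop t = p[t] :: p.drop (t + 1) := List.drop_eq_getElem_cons htlen
    rw [hdrop, PySem.List.enumerate_cons, PySem.List.pyRange_one_cons htlen']
    rw [pvALoop, pvBLoop]
    have hgetp : p[t] = PySem.List.pyGetD p (t : Int) 0 := by
      rw [PySem.List.pyGetD_natCast, List.getD_eq_getElem]
    have hnext : ((t : Int) + 1) = ((t + 1 : Nat) : Int) := by push_cast; ring
    rcases Bool.eq_false_or_eq_true (PySem.Set.contains S (t : Int)) with hct | hcf
    · -- already visited: both skip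
      have hmem : (t : Int) ∈ S := (PySem.Set.contains_iff S _).mp hct
      have hmarked : pvMarked cid (t : Int) := (hb _ (le_refl _) htlen').mp hmem
      have hbne : (PySem.List.pyGetD cid (t : Int) 0 == -1) = false :=
        beq_eq_false_iff_ne.mpr hmarked
      rw [hct, hbne]
      simp only [if_true, Bool.not_false, if_true]
      rw [hnext]
      exact ih (t + 1) S cid res (by omega) ⟨hcl, ha1, ha2, fun j hj1 hj2 => hb j (by rw [← hnext] at hj1; omega) hj2⟩
    · -- fresh index: both walk the new cycle
      have hnotmemS : (t : Int) ∉ S := by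
        intro hmem
        rw [← PySem.Set.contains_iff] at hmem
        rw [hcf] at hmem
        exact Bool.false_ne_true hmem
      have hunmA : ¬ pvMarked cid (t : Int) := fun hm => hnotmemS ((hb _ (le_refl _) htlen').mpr hm)
      have hfreshB : PySem.List.pyGetD cid (t : Int) 0 = -1 := by
        unfold pvMarked at hunmA; exact not_ne_iff.mp hunmA
      rw [hcf, hfreshB]
      simp only [Bool.false_eq_true, if_false, BEq.rfl, Bool.not_true, if_false]
      have hc0 : 0 < Function.minimalPeriod (pvF p) (t : Int) :=
        Function.minimalPeriod_pos_iff_mem_periodicPts.mpr (pvPeriodic p hp hinj _ h0t htlen')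
      have hcle : Function.minimalPeriod (pvF p) (t : Int) ≤ p.length := pvPeriodLe p hp hinj _ h0t htlen'
      -- A's walk
      have hAstart : PySem.Int.mod ((t : Int) + p[t]) (p.length : Int) = (pvF p)^[1] (t : Int) := by
        rw [Function.iterate_one, hgetp]; rfl
      rw [hAstart, ← pvTraj_one p (t : Int)]
      rw [pvAWalk_spec p (t : Int) p.length 1 S (by omega) (by omega) (by omega)]
      -- B's walk
      have hBwalk : pvBWalk p (p.length : Int) (res.length : Int) p.length (t : Int) cid (List.replicate p.length 0)
          = ((pvTraj p (t : Int) (Function.minimalPeriod (pvF p) (t : Int))).foldl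
               (fun acc j => acc.set j.toNat (res.length : Int)) cid,
             (pvTraj p (t : Int) (Function.minimalPeriod (pvF p) (t : Int))).foldl
               (fun acc j => acc.set j.toNat (PySem.List.pyGetD p j 0)) (List.replicate p.length 0)) := by
        have hunm : ∀ k : Nat, k < Function.minimalPeriod (pvF p) (t : Int) →
            PySem.List.pyGetD cid ((pvF p)^[k] (t : Int)) 0 = -1 := by
          intro k _
          have hx := pvUnmarked_cycle p hp cid ha2 (t : Int) h0t htlen' hunmA k
          unfold pvMarked at hx; exact not_ne_iff.mp hx
        have := pvBWalk_spec p hp hinj (t : Int) h0t htlen' (res.length : Int) (by positivity)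
          cid hcl (List.replicate p.length 0) hunm p.length 0 (by omega) (by omega)
        simpa [pvTraj] using this
      rw [hBwalk]
      rw [pvTuple_eq p hp (t : Int) h0t htlen']
      rw [hnext]
      apply ih (t + 1) _ _ _ (by omega)
      -- the invariant is preserved
      constructor
      · rw [pvFoldSet_len]; exact hcl
      · have hmarked_big : ∀ x : Int, 0 ≤ x → x < (p.length : Int) →
            (pvMarked ((pvTraj p (t : Int) (Function.minimalPeriod (pvF p) (t : Int))).foldl
               (fun acc j => acc.set j.toNat (res.length : Int)) cid) x
             ↔ x ∈ pvTraj p (t : Int) (Function.minimalPeriod (pvF p) (t : Int)) ∨ pvMarked cid x) := by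
          intro x hx0 hx1
          unfold pvMarked
          rw [pvFoldSet_getD _ _ _ _ hx0 (by rw [hcl]; exact hx1) (pvTraj_nonneg p hp _ h0t htlen' _)]
          by_cases hx : x ∈ pvTraj p (t : Int) (Function.minimalPeriod (pvF p) (t : Int))
          · rw [if_pos hx]
            exact ⟨fun _ => Or.inl hx, fun _ => by omega⟩
          · rw [if_neg hx]
            exact ⟨fun h => Or.inr h, fun h => h.resolve_left hx⟩
        have hmem_Sbig : ∀ x : Int,
            (x ∈ ((List.range' 1 (Function.minimalPeriod (pvF p) (t : Int) - 1)).map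
                   (fun k => (pvF p)^[k] (t : Int))).foldl PySem.Set.add S
             ↔ x ∈ S ∨ ∃ k : Nat, 1 ≤ k ∧ k < Function.minimalPeriod (pvF p) (t : Int) ∧ (pvF p)^[k] (t : Int) = x) := by
          intro x
          rw [List.foldl_map, PySem.Set.mem_foldl_add]
          constructor
          · rintro (h | ⟨b, hb1, hb2⟩)
            · exact Or.inl h
            · rw [List.mem_range'_1] at hb1
              exact Or.inr ⟨b, by omega, by omega, hb2.symm⟩
          · rintro (h | ⟨k, hk1, hk2, hk3⟩)
            · exact Or.inl h
            · exact Or.inr ⟨k, List.mem_range'_1.mpr ⟨by omega, by omega⟩, hk3.symm⟩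
        refine ⟨?_, ?_, ?_⟩
        · intro j hj0 hj1 hm
          rw [hmarked_big j hj0 hj1] at hm
          rw [hmarked_big _ (pvF_nonneg p hp j) (pvF_lt p hp j)]
          rcases hm with h | h
          · exact Or.inl (pvCycle_closed_fwd p hp hinj _ h0t htlen' j h)
          · exact Or.inr (ha1 j hj0 hj1 h)
        · intro j hj0 hj1 hm
          rw [hmarked_big _ (pvF_nonneg p hp j) (pvF_lt p hp j)] at hm
          rw [hmarked_big j hj0 hj1]
          rcases hm with h | h
          · exact Or.inl (pvCycle_closed_bwd p hp hinj _ h0t htlen' j hj0 hj1 h)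
          · exact Or.inr (ha2 j hj0 hj1 h)
        · intro j hj1 hj2
          have hjt : (t : Int) < j := by rw [← hnext] at hj1; omega
          rw [hmem_Sbig j, hmarked_big j (by omega) hj2, ← hb j (le_of_lt hjt) hj2]
          constructor
          · rintro (h | ⟨k, hk1, hk2, hk3⟩)
            · exact Or.inr h
            · exact Or.inl ((pvTraj_mem p (t : Int) j _).mpr ⟨k, hk2, hk3⟩)
          · rintro (h | h)
            · rw [pvTraj_mem] at h
              obtain ⟨k, hk, hke⟩ := h
              rcases Nat.eq_zero_or_pos k with hk0 | hkpos
              · subst hk0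
                simp only [Function.iterate_zero_apply] at hke
                omega
              · exact Or.inr ⟨k, by omega, hk, hke⟩
            · exact Or.inl h

-- ===== VERDICT (by name: the statement is the Claim_ definition above) =====
theorem calculate_pattern_orbit_spec : Claim_equal_calculate_pattern_orbit := by
  intro pattern _ hpre
  obtain ⟨hp, hsum, hnod⟩ := hpre
  unfold Spec_calculate_pattern_orbit calculate_pattern_orbit calculate_pattern_orbit_alt
  by_cases hval : pv_is_valid pattern none = true
  · rw [if_pos hval, if_pos hval]
    have hinj : pvInj pattern := by
      rw [PySem.List.enumerate_eq_map_pyRange pattern 0, List.map_map] at hnod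
      intro a b ha0 ha1 hb0 hb1 hfe
      have hlen : PySem.List.len pattern = (pattern.length : Int) := by simp [pysem]
      rw [hlen] at hnod
      have ha : a ∈ PySem.List.pyRange 0 (pattern.length : Int) 1 := PySem.List.mem_pyRange_one.mpr ⟨ha0, ha1⟩
      have hbm : b ∈ PySem.List.pyRange 0 (pattern.length : Int) 1 := PySem.List.mem_pyRange_one.mpr ⟨hb0, hb1⟩
      refine List.inj_on_of_nodup_map hnod ha hbm ?_
      show PySem.Int.mod (PySem.List.pyGetD pattern a 0 + a) (pattern.length : Int)
          = PySem.Int.mod (PySem.List.pyGetD pattern b 0 + b) (pattern.length : Int)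
      unfold pvF at hfe
      rw [Int.add_comm a _, Int.add_comm b _] at hfe
      exact hfe
    have hInv0 : pvInv pattern 0 PySem.Set.empty (List.replicate pattern.length (-1)) := by
      have hmk : ∀ x : Int, 0 ≤ x → x < (pattern.length : Int) →
          ¬ pvMarked (List.replicate pattern.length (-1)) x := by
        intro x hx0 hx1
        unfold pvMarked
        rw [PySem.List.pyGetD_eq_getElem _ _ hx0 (by simpa using hx1)]
        simp
      refine ⟨by simp, ?_, ?_, ?_⟩
      · intro j h0 h1 hm; exact absurd hm (hmk j h0 h1)
      · intro j h0 h1 hm; exact absurd hm (hmk _ (pvF_nonneg pattern hp j) (pvF_lt pattern hp j))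
      · intro j h1 h2
        constructor
        · intro h; exact absurd h (List.not_mem_nil)
        · intro h; exact absurd h (hmk j (by exact_mod_cast h1) h2)
    have := pvLoop_eq pattern hp hinj pattern.length 0 PySem.Set.empty
      (List.replicate pattern.length (-1)) [] (by omega) hInv0
    simpa using this
  · rw [if_neg hval, if_neg hval]
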